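-- pv_equiv track=rewrite | github.com/qiufengdiewu/LPInsider | 011train_final_model.py | datapreprocess
-- ===== SOURCE A (Python) =====
-- def datapreprocess(sent):
--     sent = str(sent).replace(',', ' ')
--     sent = sent.replace('(', ' ')
--     sent = sent.replace(')', ' ')
--     sent = sent.replace("'", ' ')
--     sent = sent.replace('.', ' ')
--     sent = sent.replace(':', ' ')
--     sent = sent.replace(']', ' ')
--     sent = sent.replace('[', ' ')
--     sent = sent.replace('/', ' ')
--     words = sent.split(" ")
--     temp_words = []
--     for word in words:
--         if len(word) > 0:
--             temp_words.append(word)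
--     words = temp_words
--     return words
-- ===== SOURCE B (Python) =====
-- def datapreprocess(sent):
--     delims = set(" ,()'.:][/")
--     sent = str(sent)
--     words = []
--     buf = []
--     for ch in sent:
--         if ch in delims:
--             if buf:
--                 words.append(''.join(buf))
--                 buf = []
--         else:
--             buf.append(ch)
--     if buf:
--         words.append(''.join(buf))
--     return words
-- ===== Notes on version B (the rewrite author's own statement) =====
-- stated objective: alternative
-- what changed: Replaces A's nine whole-string replace passes followed by a split-on-space pass and a filter loop with a single character-level pass that maintains a current-token buffer over the fixed 10-character delimiter set.
import Mathlib
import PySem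

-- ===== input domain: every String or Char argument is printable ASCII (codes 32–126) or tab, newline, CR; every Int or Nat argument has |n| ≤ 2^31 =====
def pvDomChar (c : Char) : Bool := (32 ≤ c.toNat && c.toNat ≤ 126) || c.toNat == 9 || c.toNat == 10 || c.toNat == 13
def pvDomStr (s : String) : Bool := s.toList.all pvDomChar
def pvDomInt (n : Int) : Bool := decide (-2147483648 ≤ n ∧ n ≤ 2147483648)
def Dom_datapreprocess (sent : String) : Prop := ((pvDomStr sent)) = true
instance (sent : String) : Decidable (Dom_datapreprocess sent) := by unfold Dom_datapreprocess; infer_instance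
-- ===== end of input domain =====

-- B tokenizes in ONE pass with a current-token buffer over a 10-char delimiter set,
-- instead of A's nine whole-string replace passes followed by split(" ") and a filter loop (objective: alternative decomposition).


-- ===== PORT A =====
-- str(sent) on a str is the identity; split(" ") with the nonempty separator never raises, so .getD [] is unreachable.
def datapreprocess (sent : String) : List String :=
  let s1 := PySem.Str.replace sent "," " "
  let s2 := PySem.Str.replace s1 "(" " "
  let s3 := PySem.Str.replace s2 ")" " "
  let s4 := PySem.Str.replace s3 "'" " "
  let s5 := PySem.Str.replace s4 "." " "
  let s6 := PySem.Str.replace s5 ":" " "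
  let s7 := PySem.Str.replace s6 "]" " "
  let s8 := PySem.Str.replace s7 "[" " "
  let s9 := PySem.Str.replace s8 "/" " "
  let words := (PySem.Str.split? s9 " ").getD []
  words.foldl (fun acc w => if PySem.Str.len w > 0 then acc ++ [w] else acc) []

-- ===== PORT B =====
def pvDelim (c : Char) : Bool := [' ', ',', '(', ')', '\'', '.', ':', ']', '[', '/'].contains c

def datapreprocess_alt (sent : String) : List String :=
  let st := sent.toList.foldl
    (fun (st : List Char × List String) c =>
      if pvDelim c then
        (if st.1.isEmpty then st else ([], st.2 ++ [String.mk st.1]))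
      else (st.1 ++ [c], st.2)) ([], [])
  if st.1.isEmpty then st.2 else st.2 ++ [String.mk st.1]

-- ===== PRECONDITION & SPEC =====
def Spec_datapreprocess (sent : String) (out : List String) : Prop := out = datapreprocess_alt sent
instance (sent : String) (out : List String) : Decidable (Spec_datapreprocess sent out) := by unfold Spec_datapreprocess; infer_instance

-- ===== CLAIM (what is proved, stated in full; the proofs are below) =====
def Claim_equal_datapreprocess : Prop := ∀ (sent : String), Dom_datapreprocess sent → Spec_datapreprocess sent (datapreprocess sent)

-- ===== LEMMAS AND PROOFS =====

-- after i replaces the string is the original mapped through `g` with the first i punctuation chars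
def pvG (L : List Char) (c : Char) : Char := if c ∈ L then ' ' else c

-- splitting a char list on a single space
def pvSplit1 : List Char → List (List Char)
  | [] => [[]]
  | c :: t =>
    if c = ' ' then [] :: pvSplit1 t
    else match pvSplit1 t with
      | [] => [[c]]
      | h :: r => (c :: h) :: r

def pvConsFst (b : List Char) : List (List Char) → List (List Char)
  | [] => [b]
  | h :: r => (b ++ h) :: r

-- recursive form of B's buffered tokenizer
def pvTok : List Char → List Char → List String
  | buf, [] => if buf.isEmpty then [] else [String.mk buf]
  | buf, c :: rest =>
    if pvDelim c then (if buf.isEmpty then pvTok buf rest else String.mk buf :: pvTok [] rest)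
    else pvTok (buf ++ [c]) rest

lemma replace_go_single (a b : Char) :
    ∀ (fuel : Nat) (l acc : List Char), l.length ≤ fuel →
      PySem.Chars.replace.go [a] [b] fuel l acc
        = acc.reverse ++ l.map (fun c => if c = a then b else c) := by
  intro fuel
  induction fuel with
  | zero =>
    intro l acc h
    have : l = [] := List.eq_nil_of_length_eq_zero (Nat.le_zero.mp h)
    subst this; simp [PySem.Chars.replace.go]
  | succ n ih =>
    intro l acc h
    cases l with
    | nil => simp [PySem.Chars.replace.go]
    | cons c t =>
      rw [PySem.Chars.replace.go]
      by_cases hc : c = a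
      · subst hc
        have hpre : [c].isPrefixOf (c :: t) = true := by simp [List.isPrefixOf]
        rw [if_pos hpre]
        simp only [List.length_cons, List.length_nil, List.drop_succ_cons, List.drop_zero] at h ⊢
        rw [ih _ _ (by omega)]
        simp
      · have hpre : [a].isPrefixOf (c :: t) = false := by
          simp [List.isPrefixOf]; exact fun hh => hc hh.symm
        rw [if_neg (by simp [hpre])]
        simp only [List.length_cons] at h
        rw [ih _ _ (by omega)]
        simp [hc]

lemma replace_single (cs : List Char) (a b : Char) :
    PySem.Chars.replace cs [a] [b] = cs.map (fun c => if c = a then b else c) := by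
  rw [PySem.Chars.replace]
  simp only [List.isEmpty_cons, if_neg]
  exact replace_go_single a b cs.length cs [] (le_refl _)

lemma map_g_nil (cs : List Char) : cs.map (pvG []) = cs := by
  have h : pvG [] = id := funext fun c => by simp [pvG]
  rw [h, List.map_id]

lemma replace_step (p : Char) (hp : p ≠ ' ') (L : List Char) (cs : List Char) :
    PySem.Chars.replace (cs.map (pvG L)) [p] [' '] = cs.map (pvG (L ++ [p])) := by
  rw [replace_single, List.map_map]
  apply List.map_congr_left
  intro c _
  simp only [Function.comp, pvG]
  by_cases hc : c ∈ L
  · simp [hc, hp.symm]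
  · by_cases hcp : c = p
    · subst hcp; simp [hc]
    · simp [hc, hcp]

lemma split1_ne_nil (l : List Char) : pvSplit1 l ≠ [] := by
  cases l with
  | nil => simp [pvSplit1]
  | cons c t =>
    rw [pvSplit1]
    split
    · simp
    · split <;> simp

lemma splitOn_go_single :
    ∀ (fuel : Nat) (l cur : List Char) (acc : List (List Char)), l.length ≤ fuel →
      PySem.Chars.splitOn.go [' '] fuel l cur acc
        = acc.reverse ++ pvConsFst cur.reverse (pvSplit1 l) := by
  intro fuel
  induction fuel with
  | zero =>
    intro l cur acc h
    have : l = [] := List.eq_nil_of_length_eq_zero (Nat.le_zero.mp h)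
    subst this; simp [PySem.Chars.splitOn.go, pvSplit1, pvConsFst]
  | succ n ih =>
    intro l cur acc h
    cases l with
    | nil => simp [PySem.Chars.splitOn.go, pvSplit1, pvConsFst]
    | cons c t =>
      rw [PySem.Chars.splitOn.go]
      simp only [List.length_cons] at h
      by_cases hc : c = ' '
      · subst hc
        have hpre : [' '].isPrefixOf (' ' :: t) = true := by simp [List.isPrefixOf]
        rw [if_pos hpre]
        simp only [List.length_cons, List.length_nil, List.drop_succ_cons, List.drop_zero]
        rw [ih _ _ _ (by omega)]
        rw [pvSplit1, if_pos rfl]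
        obtain ⟨h1, r, hr⟩ : ∃ h1 r, pvSplit1 t = h1 :: r := by
          cases hs : pvSplit1 t with
          | nil => exact absurd hs (split1_ne_nil t)
          | cons x y => exact ⟨x, y, rfl⟩
        simp [hr, pvConsFst]
      · have hpre : [' '].isPrefixOf (c :: t) = false := by
          simp [List.isPrefixOf]; exact fun hh => absurd hh.symm hc
        rw [if_neg (by simp [hpre])]
        rw [ih _ _ _ (by omega)]
        rw [pvSplit1, if_neg hc]
        obtain ⟨h1, r, hr⟩ : ∃ h1 r, pvSplit1 t = h1 :: r := by
          cases hs : pvSplit1 t with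
          | nil => exact absurd hs (split1_ne_nil t)
          | cons x y => exact ⟨x, y, rfl⟩
        simp [hr, pvConsFst]

lemma splitOn_single (ds : List Char) :
    PySem.Chars.splitOn ds [' '] = pvConsFst [] (pvSplit1 ds) := by
  rw [PySem.Chars.splitOn]
  exact (by simpa using splitOn_go_single (ds.length + 1) ds [] [] (by omega))

lemma foldl_filt (ws : List String) (acc : List String) :
    ws.foldl (fun acc w => if PySem.Str.len w > 0 then acc ++ [w] else acc) acc
      = acc ++ ws.filter (fun w => !w.toList.isEmpty) := by
  induction ws generalizing acc with
  | nil => simp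
  | cons w t ih =>
    rw [List.foldl_cons, List.filter_cons]
    by_cases hw : w.toList = []
    · have hc : ¬ PySem.Str.len w > 0 := by simp [PySem.Str.len, PySem.Chars.len, hw]
      rw [if_neg hc, ih]
      simp [hw]
    · have hc : PySem.Str.len w > 0 := by
        simp only [PySem.Str.len, PySem.Chars.len]
        exact_mod_cast List.length_pos_iff.mpr hw
      rw [if_pos hc, ih]
      simp [hw]

-- the main correspondence: B's tokenizer equals filter-nonempty of the space-split of the mapped list
lemma tok_eq (cs : List Char) : ∀ (buf : List Char),
    pvTok buf cs
      = ((pvConsFst buf (pvSplit1 (cs.map (pvG [',', '(', ')', '\'', '.', ':', ']', '[', '/'])))).filter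
          (fun w => !w.isEmpty)).map String.mk := by
  induction cs with
  | nil =>
    intro buf
    by_cases hb : buf = []
    · simp [pvTok, pvSplit1, pvConsFst, hb]
    · simp [pvTok, pvSplit1, pvConsFst, hb, List.isEmpty_iff]
  | cons c t ih =>
    intro buf
    by_cases hd : pvDelim c = true
    · have hmem : c ∈ ([' ', ',', '(', ')', '\'', '.', ':', ']', '[', '/'] : List Char) := by
        simpa [pvDelim] using hd
      have hg : pvG [',', '(', ')', '\'', '.', ':', ']', '[', '/'] c = ' ' := by
        rcases List.mem_cons.mp hmem with h | h
        · rw [h]; simp [pvG]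
        · simp [pvG, h]
      rw [pvTok, if_pos hd]
      simp only [List.map_cons, hg]
      rw [pvSplit1, if_pos rfl]
      obtain ⟨h1, r, hr⟩ : ∃ h1 r, pvSplit1 (t.map (pvG [',', '(', ')', '\'', '.', ':', ']', '[', '/'])) = h1 :: r := by
        cases hs : pvSplit1 (t.map (pvG [',', '(', ')', '\'', '.', ':', ']', '[', '/'])) with
        | nil => exact absurd hs (split1_ne_nil _)
        | cons x y => exact ⟨x, y, rfl⟩
      have ihr := ih []
      rw [hr] at ihr ⊢
      simp only [pvConsFst, List.nil_append] at ihr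
      by_cases hb : buf = []
      · simp [hb, pvConsFst, ihr, List.filter_cons]
      · simp [hb, pvConsFst, ihr, List.filter_cons, List.isEmpty_iff, hb]
    · have hnm : c ∉ ([',', '(', ')', '\'', '.', ':', ']', '[', '/'] : List Char) := by
        intro hmem; apply hd; revert hmem; simp [pvDelim]; intro h; rcases h with h|h|h|h|h|h|h|h|h <;> simp [h]
      have hg : pvG [',', '(', ')', '\'', '.', ':', ']', '[', '/'] c = c := by simp [pvG, hnm]
      have hcs : c ≠ ' ' := by intro h; apply hd; simp [pvDelim, h]
      rw [pvTok, if_neg (by simp [hd])]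
      simp only [List.map_cons, hg]
      rw [pvSplit1, if_neg hcs]
      obtain ⟨h1, r, hr⟩ : ∃ h1 r, pvSplit1 (t.map (pvG [',', '(', ')', '\'', '.', ':', ']', '[', '/'])) = h1 :: r := by
        cases hs : pvSplit1 (t.map (pvG [',', '(', ')', '\'', '.', ':', ']', '[', '/'])) with
        | nil => exact absurd hs (split1_ne_nil _)
        | cons x y => exact ⟨x, y, rfl⟩
      have ihb := ih (buf ++ [c])
      rw [hr] at ihb ⊢
      simp only [pvConsFst] at ihb ⊢
      rw [ihb]
      simp

-- B's foldl with final flush equals the recursive tokenizer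
def pvStep (st : List Char × List String) (c : Char) : List Char × List String :=
  if pvDelim c then
    (if st.1.isEmpty then st else ([], st.2 ++ [String.mk st.1]))
  else (st.1 ++ [c], st.2)

def pvFlush (st : List Char × List String) : List String :=
  if st.1.isEmpty then st.2 else st.2 ++ [String.mk st.1]

lemma foldl_tok (cs : List Char) : ∀ (buf : List Char) (out : List String),
    pvFlush (cs.foldl pvStep (buf, out)) = out ++ pvTok buf cs := by
  induction cs with
  | nil =>
    intro buf out
    by_cases hb : buf = [] <;> simp [pvFlush, pvTok, hb]
  | cons c t ih =>
    intro buf out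
    rw [List.foldl_cons]
    by_cases hd : pvDelim c = true
    · rw [pvTok, if_pos hd]
      by_cases hb : buf = []
      · rw [show pvStep (buf, out) c = (buf, out) from by simp [pvStep, hd, hb]]
        simpa [hb] using ih buf out
      · rw [show pvStep (buf, out) c = ([], out ++ [String.mk buf]) from by
          simp [pvStep, hd, List.isEmpty_iff, hb]]
        rw [ih [] (out ++ [String.mk buf])]
        simp [List.isEmpty_iff, hb]
    · rw [pvTok, if_neg (by simp [hd])]
      rw [show pvStep (buf, out) c = (buf ++ [c], out) from by simp [pvStep, hd]]
      exact ih (buf ++ [c]) out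

-- ===== VERDICT (by name: the statement is the Claim_ definition above) =====
theorem datapreprocess_spec : Claim_equal_datapreprocess := by
  intro sent _
  unfold Spec_datapreprocess
  have hB : datapreprocess_alt sent = pvTok [] sent.toList := by
    have h0 : datapreprocess_alt sent = pvFlush (sent.toList.foldl pvStep ([], [])) := rfl
    rw [h0, foldl_tok]; simp
  rw [hB, tok_eq]
  simp only [datapreprocess]
  -- reduce the A side to char lists
  have hs9 : (PySem.Str.replace (PySem.Str.replace (PySem.Str.replace (PySem.Str.replace
      (PySem.Str.replace (PySem.Str.replace (PySem.Str.replace (PySem.Str.replace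
      (PySem.Str.replace sent "," " ") "(" " ") ")" " ") "'" " ") "." " ") ":" " ")
      "]" " ") "[" " ") "/" " ").toList
      = sent.toList.map (pvG [',', '(', ')', '\'', '.', ':', ']', '[', '/']) := by
    simp only [PySem.Str.toList_replace]
    rw [show ("," : String).toList = [','] from rfl, show (" " : String).toList = [' '] from rfl,
        show ("(" : String).toList = ['('] from rfl, show (")" : String).toList = [')'] from rfl,
        show ("'" : String).toList = ['\''] from rfl, show ("." : String).toList = ['.'] from rfl,
        show (":" : String).toList = [':'] from rfl, show ("]" : String).toList = [']'] from rfl,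
        show ("[" : String).toList = ['['] from rfl, show ("/" : String).toList = ['/'] from rfl]
    rw [← map_g_nil sent.toList]
    rw [replace_step ',' (by decide) [], replace_step '(' (by decide),
        replace_step ')' (by decide), replace_step '\'' (by decide),
        replace_step '.' (by decide), replace_step ':' (by decide),
        replace_step ']' (by decide), replace_step '[' (by decide),
        replace_step '/' (by decide)]
    simp [map_g_nil]
  -- the split is a `some`
  have hsp := PySem.Str.split?_map (PySem.Str.replace (PySem.Str.replace (PySem.Str.replace (PySem.Str.replace
      (PySem.Str.replace (PySem.Str.replace (PySem.Str.replace (PySem.Str.replace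
      (PySem.Str.replace sent "," " ") "(" " ") ")" " ") "'" " ") "." " ") ":" " ")
      "]" " ") "[" " ") "/" " ") " "
  rw [show (" " : String).toList = [' '] from rfl] at hsp
  rw [PySem.Chars.split?, if_neg (by simp)] at hsp
  obtain ⟨ws, hws⟩ : ∃ ws, PySem.Str.split? (PySem.Str.replace (PySem.Str.replace (PySem.Str.replace (PySem.Str.replace
      (PySem.Str.replace (PySem.Str.replace (PySem.Str.replace (PySem.Str.replace
      (PySem.Str.replace sent "," " ") "(" " ") ")" " ") "'" " ") "." " ") ":" " ")
      "]" " ") "[" " ") "/" " ") " " = some ws := by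
    cases h : PySem.Str.split? (PySem.Str.replace (PySem.Str.replace (PySem.Str.replace (PySem.Str.replace
      (PySem.Str.replace (PySem.Str.replace (PySem.Str.replace (PySem.Str.replace
      (PySem.Str.replace sent "," " ") "(" " ") ")" " ") "'" " ") "." " ") ":" " ")
      "]" " ") "[" " ") "/" " ") " " with
    | none => rw [h] at hsp; simp at hsp
    | some ws => exact ⟨ws, rfl⟩
  rw [hws] at hsp
  simp only [Option.map_some, Option.some.injEq] at hsp
  rw [hws, Option.getD_some, foldl_filt, List.nil_append]
  -- relate the String-level filter to the char-list-level one
  have hmap : ws.map String.toList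
      = pvConsFst [] (pvSplit1 (sent.toList.map (pvG [',', '(', ')', '\'', '.', ':', ']', '[', '/']))) := by
    rw [hsp, hs9, splitOn_single]
  rw [← hmap, List.filter_map]
  rw [List.map_map]
  have h1 : (String.mk ∘ String.toList) = id := funext fun s => by simp [String.mk]
  rw [h1, List.map_id]
  exact (List.filter_congr fun w _ => by simp [Function.comp]).symm
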